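-- pv_equiv track=rewrite | github.com/runstr/AoC22 | y2023/Day13/day13_1.py | check_reflection
-- ===== SOURCE A (Python) =====
-- def check_reflection(this_row):
--
--     for i in range(0, len(this_row)-1):
--         left_add = 0
--         right_add = 1
--         reflection = True
--         while True:
--             if i+right_add >= len(this_row) or i-left_add < 0:
--                 break
--             if this_row[i+right_add] != this_row[i-left_add]:
--                 reflection = False
--                 break
--             right_add+=1
--             left_add+=1
--         if reflection:
--             return i+1
-- ===== SOURCE B (Python) =====
-- def check_reflection(this_row):
--     n = len(this_row)
--     for p in range(1, n):
--         if this_row[p - 1] == this_row[p]: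
--             k = min(p, n - p)
--             if this_row[p - k:p] == this_row[p:p + k][::-1]:
--                 return p
-- ===== Notes on version B (the rewrite author's own statement) =====
-- stated objective: alternative
-- what changed: Replaces A's per-split inner while-loop of index-pair comparisons by a per-split whole-list slice/reverse comparison, guarded by a cheap centre-pair equality test.
import Mathlib
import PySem

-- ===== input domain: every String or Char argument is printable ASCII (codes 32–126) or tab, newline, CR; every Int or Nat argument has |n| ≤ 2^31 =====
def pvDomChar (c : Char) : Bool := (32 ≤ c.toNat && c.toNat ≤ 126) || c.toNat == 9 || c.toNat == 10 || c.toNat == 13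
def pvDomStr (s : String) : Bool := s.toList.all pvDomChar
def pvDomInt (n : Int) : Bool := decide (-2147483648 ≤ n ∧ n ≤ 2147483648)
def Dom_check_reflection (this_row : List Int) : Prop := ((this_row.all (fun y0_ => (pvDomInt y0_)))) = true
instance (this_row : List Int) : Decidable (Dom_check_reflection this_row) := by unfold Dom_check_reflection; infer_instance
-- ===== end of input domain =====

-- B replaces A's per-split inner while-loop of pairwise index comparisons by a whole-list
-- slice/reverse comparison per split, behind a centre-pair guard (alternative decomposition,
-- same asymptotic cost).

-- ===== PORT A =====
-- the inner 'while True' loop: returns the final value of 'reflection'; fuel bounds the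
-- iteration count (row.length always suffices since right_add grows each step)
def pvLoopA (row : List Int) (i : Int) : Nat → Int → Int → Bool
  | 0, _, _ => true
  | fuel + 1, left_add, right_add =>
    if i + right_add ≥ (row.length : Int) ∨ i - left_add < 0 then true
    else if PySem.List.pyGet? row (i + right_add) ≠ PySem.List.pyGet? row (i - left_add) then false
    else pvLoopA row i fuel (left_add + 1) (right_add + 1)

-- the 'for i in range(...)' with early return
def pvGoA (row : List Int) : List Int → Option Int
  | [] => none
  | i :: rest => if pvLoopA row i row.length 0 1 then some (i + 1) else pvGoA row rest

def check_reflection (this_row : List Int) : Option Int :=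
  pvGoA this_row (PySem.List.pyRange 0 ((this_row.length : Int) - 1) 1)

-- ===== PORT B =====
def pvGoB (row : List Int) : List Int → Option Int
  | [] => none
  | p :: rest =>
    if PySem.List.pyGet? row (p - 1) = PySem.List.pyGet? row p then
      let k := min p ((row.length : Int) - p)
      if PySem.List.slice row (some (p - k)) (some p)
          = (PySem.List.slice row (some p) (some (p + k))).reverse
      then some p else pvGoB row rest
    else pvGoB row rest

def check_reflection_alt (this_row : List Int) : Option Int :=
  pvGoB this_row (PySem.List.pyRange 1 (this_row.length : Int) 1)

-- ===== PRECONDITION & SPEC =====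
def Spec_check_reflection (this_row : List Int) (out : Option Int) : Prop := out = check_reflection_alt this_row
instance (this_row : List Int) (out : Option Int) : Decidable (Spec_check_reflection this_row out) := by unfold Spec_check_reflection; infer_instance

-- ===== CLAIM (what is proved, stated in full; the proofs are below) =====
def Claim_equal_check_reflection : Prop := ∀ (this_row : List Int), Dom_check_reflection this_row → Spec_check_reflection this_row (check_reflection this_row)

-- ===== LEMMAS AND PROOFS =====

-- characterisation of A's inner loop as a pointwise mirror condition
lemma pvLoopA_iff (row : List Int) (j la fuel : Nat)
    (hf : min (j + 1) (row.length - (j + 1)) ≤ fuel + la) :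
    (pvLoopA row (j : Int) fuel (la : Int) ((la : Int) + 1) = true) ↔
    (∀ t : Nat, la ≤ t → t < min (j + 1) (row.length - (j + 1)) →
      row[j + 1 + t]? = row[j - t]?) := by
  induction fuel generalizing la with
  | zero =>
    simp only [pvLoopA, true_iff]
    intro t h1 h2
    exact absurd h2 (by omega)
  | succ fuel ih =>
    by_cases hbr : (j : Int) + ((la : Int) + 1) ≥ (row.length : Int) ∨ (j : Int) - (la : Int) < 0
    · simp only [pvLoopA, if_pos hbr, true_iff]
      intro t h1 h2
      exact absurd h2 (by omega)
    · have hla : la < min (j + 1) (row.length - (j + 1)) := by omega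
      have hg1 : PySem.List.pyGet? row ((j : Int) + ((la : Int) + 1)) = row[j + 1 + la]? := by
        rw [show (j : Int) + ((la : Int) + 1) = ((j + 1 + la : Nat) : Int) by push_cast; ring,
            PySem.List.pyGet?_natCast]
      have hg2 : PySem.List.pyGet? row ((j : Int) - (la : Int)) = row[j - la]? := by
        rw [show (j : Int) - (la : Int) = ((j - la : Nat) : Int) by omega,
            PySem.List.pyGet?_natCast]
      simp only [pvLoopA, if_neg hbr, hg1, hg2, ne_eq, ite_not]
      by_cases heq : row[j + 1 + la]? = row[j - la]?
      · rw [if_pos heq]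
        have ih' := ih (la + 1) (by omega)
        push_cast at ih'
        rw [ih']
        constructor
        · intro h t h1 h2
          rcases Nat.eq_or_lt_of_le h1 with h1 | h1
          · subst h1; exact heq
          · exact h t h1 h2
        · intro h t h1 h2
          exact h t (by omega) h2
      · rw [if_neg heq]
        constructor
        · intro h; cases h
        · intro h; exact absurd (h la le_rfl hla) heq

-- characterisation of B's slice test as the same pointwise mirror condition
lemma pvSlice_iff (row : List Int) (j : Nat) (hj : j + 1 < row.length) :
    ((PySem.List.slice row (some ((j : Int) + 1 - min ((j : Int) + 1) ((row.length : Int) - ((j : Int) + 1)))) (some ((j : Int) + 1))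
        = (PySem.List.slice row (some ((j : Int) + 1)) (some ((j : Int) + 1 + min ((j : Int) + 1) ((row.length : Int) - ((j : Int) + 1))))).reverse)) ↔
    (∀ t : Nat, t < min (j + 1) (row.length - (j + 1)) →
      row[j + 1 + t]? = row[j - t]?) := by
  rw [show (j : Int) + 1 - min ((j : Int) + 1) ((row.length : Int) - ((j : Int) + 1))
        = ((j + 1 - min (j + 1) (row.length - (j + 1)) : Nat) : Int) by omega,
      show (j : Int) + 1 + min ((j : Int) + 1) ((row.length : Int) - ((j : Int) + 1))
        = ((j + 1 + min (j + 1) (row.length - (j + 1)) : Nat) : Int) by omega,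
      show (j : Int) + 1 = ((j + 1 : Nat) : Int) by push_cast; ring,
      PySem.List.slice_natCast, PySem.List.slice_natCast]
  set k := min (j + 1) (row.length - (j + 1)) with hkdef
  have hk1 : 1 ≤ k := by omega
  have hkp : k ≤ j + 1 := by omega
  have hkn : j + 1 + k ≤ row.length := by omega
  rw [show j + 1 - (j + 1 - k) = k by omega, show j + 1 + k - (j + 1) = k by omega]
  have hlen2 : ((row.drop (j + 1)).take k).length = k := by
    simp [List.length_take, List.length_drop]; omega
  constructor
  · intro h t ht
    have hs := congrArg (fun l => l[k - 1 - t]?) h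
    simp only at hs
    rw [List.getElem?_take_of_lt (by omega), List.getElem?_drop,
        List.getElem?_reverse (by omega), hlen2,
        List.getElem?_take_of_lt (by omega), List.getElem?_drop] at hs
    rw [show j + 1 - k + (k - 1 - t) = j - t by omega,
        show k - 1 - (k - 1 - t) = t by omega] at hs
    exact hs.symm
  · intro h
    apply List.ext_getElem?
    intro s
    by_cases hs : s < k
    · rw [List.getElem?_take_of_lt (by omega), List.getElem?_drop,
          List.getElem?_reverse (by omega), hlen2,
          List.getElem?_take_of_lt (by omega), List.getElem?_drop]
      have := h (k - 1 - s) (by omega)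
      rw [show j - (k - 1 - s) = j + 1 - k + s by omega] at this
      exact this.symm
    · rw [List.getElem?_eq_none (by simp [List.length_take, List.length_drop]; omega),
          List.getElem?_eq_none (by simp [List.length_take, List.length_drop]; omega)]

lemma pvGo_eq (row : List Int) (j : Nat) :
    pvGoA row (PySem.List.pyRange (j : Int) ((row.length : Int) - 1) 1)
      = pvGoB row (PySem.List.pyRange ((j : Int) + 1) (row.length : Int) 1) := by
  by_cases hlt : j + 1 < row.length
  · rw [PySem.List.pyRange_one_cons (by omega : (j : Int) < (row.length : Int) - 1),
        PySem.List.pyRange_one_cons (by omega : (j : Int) + 1 < (row.length : Int))]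
    show (if pvLoopA row (j : Int) row.length 0 1 then some ((j : Int) + 1)
          else pvGoA row (PySem.List.pyRange ((j : Int) + 1) ((row.length : Int) - 1) 1)) = _
    have hA := pvLoopA_iff row j 0 row.length (by omega)
    push_cast at hA
    have hB := pvSlice_iff row j hlt
    have hgeq : (PySem.List.pyGet? row ((j : Int) + 1 - 1) = PySem.List.pyGet? row ((j : Int) + 1))
        ↔ (row[j]? = row[j + 1]?) := by
      rw [show (j : Int) + 1 - 1 = ((j : Nat) : Int) by ring,
          show (j : Int) + 1 = ((j + 1 : Nat) : Int) by push_cast; ring,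
          PySem.List.pyGet?_natCast, PySem.List.pyGet?_natCast]
    by_cases hmir : ∀ t : Nat, t < min (j + 1) (row.length - (j + 1)) →
        row[j + 1 + t]? = row[j - t]?
    · have hA' : pvLoopA row (j : Int) row.length 0 1 = true :=
        hA.mpr (fun t _ ht => hmir t ht)
      rw [if_pos hA']
      unfold pvGoB
      have hgd : row[j]? = row[j + 1]? := by
        simpa using (hmir 0 (by omega)).symm
      rw [if_pos (hgeq.mpr hgd), if_pos (hB.mpr hmir)]
    · have hA' : ¬ (pvLoopA row (j : Int) row.length 0 1 = true) := by
        rw [hA]; intro h; exact hmir (fun t ht => h t (by omega) ht)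
      rw [if_neg hA']
      unfold pvGoB
      have hrec := pvGo_eq row (j + 1)
      push_cast at hrec
      by_cases hgd : row[j]? = row[j + 1]?
      · rw [if_pos (hgeq.mpr hgd), if_neg (fun h => hmir (hB.mp h))]
        exact hrec
      · rw [if_neg (fun h => hgd (hgeq.mp h))]
        exact hrec
  · rw [PySem.List.pyRange_one_eq_nil (by omega : (row.length : Int) - 1 ≤ (j : Int)),
        PySem.List.pyRange_one_eq_nil (by omega : (row.length : Int) ≤ (j : Int) + 1)]
    rfl
termination_by row.length - j

-- ===== VERDICT (by name: the statement is the Claim_ definition above) =====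
theorem check_reflection_spec : Claim_equal_check_reflection := by
  intro row _
  unfold Spec_check_reflection check_reflection check_reflection_alt
  simpa using pvGo_eq row 0
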